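-- pv_equiv track=rewrite | github.com/arpitp07/UChicago_MScA_RTIS | HW1.py | kthPerson
-- ===== SOURCE A (Python) =====
-- import heapq
--
-- def kthPerson(k, p, q):
--     ret = [0]*len(q)
--     q_sort = sorted([(x[1], x[0]) for x in enumerate(q)])
--     bus_heap = p[:k]
--     # p_dup = p[k:]
--     index = k
--     j_last = None
--     heapq.heapify(bus_heap)
--
--     for (i, (j, j_ret)) in enumerate(q_sort):
--         if k > len(p):
--             break
--         elif j == j_last:
--             ret[j_ret] = index
--
--         else:
--             while bus_heap[0] < j:
--                 bus_heap = p[index-1:index + k-1]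
--                 if len(bus_heap) < k:
--                     return ret
--                 heapq.heapify(bus_heap)
--                 index += 1
--             ret[j_ret] = index
--             j_last = j
--     return ret
-- ===== SOURCE B (Python) =====
-- def kthPerson(k, p, q):
--     ret = [0] * len(q)
--     if not q or k > len(p):
--         return ret
--     # stage 1: precompute the minimum of every successive bus window once
--     mins = [min(p[:k])]
--     i = k
--     while True:
--         w = p[i-1:i+k-1]
--         if len(w) < k:
--             break
--         mins.append(min(w))
--         i += 1
--     # stage 2: one monotone pass over the sorted queries, consuming the
--     # precomputed minima as a stack; no window is rebuilt or rescanned here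
--     stack = mins[::-1]
--     ans = k
--     for j, j_ret in sorted((v, idx) for idx, v in enumerate(q)):
--         while stack[-1] < j:
--             stack.pop()
--             if not stack:
--                 return ret
--             ans += 1
--         ret[j_ret] = ans
--     return ret
-- ===== Notes on version B (the rewrite author's own statement) =====
-- stated objective: alternative
-- what changed: Replaced A's heap-per-query scheme by a two-stage algorithm: stage 1 precomputes the minimum of every successive bus window once; stage 2 answers the sorted queries in one monotone pass that consumes those minima as a stack, eliminating heapq, the per-query window rebuilding inside the query loop, and the j_last dedup branch.
-- outside the precondition, e.g. on kthPerson(-2, [2, 5, 1], [2]): A returns [-2], B raises ValueError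
import Mathlib
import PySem

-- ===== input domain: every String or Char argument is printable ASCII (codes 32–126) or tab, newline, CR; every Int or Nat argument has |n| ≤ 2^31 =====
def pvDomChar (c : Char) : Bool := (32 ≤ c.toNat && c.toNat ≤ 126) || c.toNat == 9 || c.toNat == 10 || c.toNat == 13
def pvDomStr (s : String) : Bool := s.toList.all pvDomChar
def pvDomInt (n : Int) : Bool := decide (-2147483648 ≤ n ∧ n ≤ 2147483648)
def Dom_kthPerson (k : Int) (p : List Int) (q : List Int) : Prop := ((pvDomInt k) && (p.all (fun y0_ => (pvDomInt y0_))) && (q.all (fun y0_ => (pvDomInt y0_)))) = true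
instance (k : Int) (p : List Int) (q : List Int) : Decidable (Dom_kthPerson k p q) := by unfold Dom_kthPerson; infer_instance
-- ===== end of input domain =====

-- B is a two-stage algorithm (precompute all window minima once, then one monotone
-- stack-consuming pass over the sorted queries, no heap, no per-query window rebuild,
-- no j_last dedup); objective: alternative (no speed claim).

-- ===== PORT A =====
-- heapq.heapify is modelled up to this program's observables: kthPerson only ever reads
-- element 0 (the heap root = the minimum) and the length of the heapified list, and both
-- are exact here (same length, same multiset, root = first minimum); the order of the
-- remaining elements may differ from CPython's internal heap layout, which the program
-- never observes.
def pyHeapify (l : List Int) : List Int :=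
  match PySem.List.min? l (fun x => x) with
  | none => []
  | some m => m :: l.erase m

-- the inner 'while bus_heap[0] < j' loop of A; 'none' = the early 'return ret';
-- fuel is a termination bound only (index strictly increases and the loop returns
-- once the slice gets shorter than k); on the empty-heap access where Python raises
-- IndexError (outside Pre_) the port exits with the current state (junk).
def kpWhileA (p : List Int) (k j : Int) : Nat → List Int → Int → Option (List Int × Int)
  | 0, _, _ => none
  | fuel + 1, heap, index =>
    match PySem.List.pyGet? heap 0 with
    | none => some (heap, index)   -- Python raises IndexError here (outside Pre_)
    | some h0 =>
      if h0 < j then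
        let w := PySem.List.slice p (some (index - 1)) (some (index + k - 1))
        if (w.length : Int) < k then none
        else kpWhileA p k j fuel (pyHeapify w) (index + 1)
      else some (heap, index)

-- the 'for (i, (j, j_ret)) in enumerate(q_sort)' loop of A
def kpForA (p : List Int) (k : Int) :
    List (Int × Int) → List Int → List Int → Int → Option Int → List Int
  | [], ret, _, _, _ => ret
  | (j, jret) :: rest, ret, heap, index, jlast =>
    if (p.length : Int) < k then ret   -- 'if k > len(p): break'
    else if some j = jlast then
      kpForA p k rest (PySem.List.pySetD ret jret index) heap index jlast
    else
      match kpWhileA p k j (p.length + 2) heap index with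
      | none => ret
      | some (heap', index') =>
        kpForA p k rest (PySem.List.pySetD ret jret index') heap' index' (some j)

def kthPerson (k : Int) (p : List Int) (q : List Int) : List Int :=
  let ret := List.replicate q.length 0
  let qsort := PySem.List.sorted2
      ((PySem.List.enumerate q 0).map (fun x => (x.2, x.1))) (fun y => y.1) (fun y => y.2)
  let busHeap := pyHeapify (PySem.List.slice p none (some k))
  kpForA p k qsort ret busHeap k none

-- ===== PORT B =====
-- stage 1: the 'while True' builder of the mins list; fuel is a termination bound only
-- (i strictly increases and the loop breaks once the slice gets shorter than k).
-- On min([]) where Python raises ValueError (k ≤ 0, outside Pre_) the port exits with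
-- the list built so far (junk).
def kpBuild (p : List Int) (k : Int) : Nat → Int → List Int → List Int
  | 0, _, acc => acc
  | fuel + 1, i, acc =>
    let w := PySem.List.slice p (some (i - 1)) (some (i + k - 1))
    if (w.length : Int) < k then acc
    else
      match PySem.List.min? w (fun x => x) with
      | none => acc   -- Python raises ValueError here (outside Pre_)
      | some m => kpBuild p k fuel (i + 1) (acc ++ [m])

-- stage 2 inner loop: 'while stack[-1] < j: stack.pop(); if not stack: return ret; ans += 1'.
-- The Python stack is mins[::-1] popped from the END, i.e. its top-first reading is a
-- suffix of mins; the port represents the stack top-first (head = stack[-1], pop = tail),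
-- which is exactly the sequence of values the Python loop observes. 'none' = the early
-- 'return ret'; on stack[-1] of an empty stack Python raises IndexError (unreachable:
-- the loop returns the moment the stack empties), the port exits with the state (junk).
def kpConsume (j : Int) : List Int → Int → Option (List Int × Int)
  | [], ans => some ([], ans)
  | m :: rest, ans =>
    if m < j then
      match rest with
      | [] => none
      | _ :: _ => kpConsume j rest (ans + 1)
    else some (m :: rest, ans)

-- stage 2: 'for j, j_ret in sorted(...)'
def kpForB (k : Int) : List (Int × Int) → List Int → List Int → Int → List Int
  | [], ret, _, _ => ret
  | (j, jret) :: restq, ret, stack, ans =>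
    match kpConsume j stack ans with
    | none => ret
    | some (stack', ans') =>
      kpForB k restq (PySem.List.pySetD ret jret ans') stack' ans'

def kthPerson_alt (k : Int) (p : List Int) (q : List Int) : List Int :=
  let ret := List.replicate q.length 0
  if q = [] then ret
  else if (p.length : Int) < k then ret   -- 'if not q or k > len(p): return ret'
  else
    match PySem.List.min? (PySem.List.slice p none (some k)) (fun x => x) with
    | none => ret   -- Python raises ValueError on min(p[:k]) here (k ≤ 0, outside Pre_)
    | some m0 =>
      let mins := kpBuild p k (p.length + 2) k [m0]
      let qsort := PySem.List.sorted2
          ((PySem.List.enumerate q 0).map (fun x => (x.2, x.1))) (fun y => y.1) (fun y => y.2)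
      kpForB k qsort ret mins k

-- ===== PRECONDITION & SPEC =====
-- Pre_ excludes k ≤ 0 with a nonempty q (a nonsensical bus capacity): there A almost always
-- raises IndexError on the empty initial heap and B raises ValueError on min of an empty
-- window; in the rare cases where negative-slice wraparound lets A return, the value is an
-- accident of slicing and B raises (see the cite).
def Pre_kthPerson (k : Int) (p : List Int) (q : List Int) : Prop := 1 ≤ k ∨ q = []
instance (k : Int) (p : List Int) (q : List Int) : Decidable (Pre_kthPerson k p q) := by
  unfold Pre_kthPerson; infer_instance

def pvWitness_kthPerson : Int × List Int × List Int := (2, [2, 5, 1], [0, 3])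

def Spec_kthPerson (k : Int) (p : List Int) (q : List Int) (out : List Int) : Prop :=
  out = kthPerson_alt k p q
instance (k : Int) (p : List Int) (q : List Int) (out : List Int) :
    Decidable (Spec_kthPerson k p q out) := by unfold Spec_kthPerson; infer_instance

-- ===== CLAIM (what is proved, stated in full; the proofs are below) =====
def Claim_equal_kthPerson : Prop :=
  ∀ (k : Int) (p : List Int) (q : List Int),
    Dom_kthPerson k p q → Pre_kthPerson k p q → Spec_kthPerson k p q (kthPerson k p q)

-- ===== LEMMAS AND PROOFS =====

-- the canonical tail of B's mins list from state index i
def kpMins (p : List Int) (k : Int) (i : Int) : List Int :=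
  kpBuild p k (p.length + 2) i []

-- one-step unfolding equations (rw these exactly once; 'simp [kpBuild]' over-unfolds)
theorem kpBuild_succ (p : List Int) (k : Int) (fuel : Nat) (i : Int) (acc : List Int) :
    kpBuild p k (fuel + 1) i acc =
      (if ((PySem.List.slice p (some (i - 1)) (some (i + k - 1))).length : Int) < k then acc
       else
         match PySem.List.min? (PySem.List.slice p (some (i - 1)) (some (i + k - 1)))
             (fun x => x) with
         | none => acc
         | some m => kpBuild p k fuel (i + 1) (acc ++ [m])) := rfl

theorem kpWhileA_succ (p : List Int) (k j : Int) (fuel : Nat) (heap : List Int) (index : Int) :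
    kpWhileA p k j (fuel + 1) heap index =
      (match PySem.List.pyGet? heap 0 with
       | none => some (heap, index)
       | some h0 =>
         if h0 < j then
           if ((PySem.List.slice p (some (index - 1)) (some (index + k - 1))).length : Int) < k
           then none
           else kpWhileA p k j fuel
             (pyHeapify (PySem.List.slice p (some (index - 1)) (some (index + k - 1))))
             (index + 1)
         else some (heap, index)) := rfl

-- the root of the heapified list is exactly min(list) (none on the empty list)
theorem pyGet?_pyHeapify_zero (l : List Int) :
    PySem.List.pyGet? (pyHeapify l) 0 = PySem.List.min? l (fun x => x) := by
  unfold pyHeapify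
  cases h : PySem.List.min? l (fun x => x) with
  | none => simp [PySem.List.pyGet?]
  | some m => simp only [PySem.List.pyGet?_zero_cons]

theorem clampIdx_of_nonneg (n : Nat) (a : Int) (ha : 0 ≤ a) :
    ((PySem.List.clampIdx n a : Nat) : Int) = min a n := by
  have h : a = ((a.toNat : Nat) : Int) := by omega
  rw [h, PySem.List.clampIdx_natCast]
  omega

-- length of the window slice at state index i (i ≥ 1, k ≥ 1)
theorem window_len_int (p : List Int) (k i : Int) (hk : 1 ≤ k) (hi : 1 ≤ i) :
    ((PySem.List.slice p (some (i - 1)) (some (i + k - 1))).length : Int) =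
      min (i + k - 1) (p.length : Int) - min (i - 1) (p.length : Int) := by
  rw [PySem.List.length_slice]
  have c1 := clampIdx_of_nonneg p.length (i + k - 1) (by omega)
  have c2 := clampIdx_of_nonneg p.length (i - 1) (by omega)
  omega

-- a full window is nonempty, hence has a minimum
theorem window_min_some (w : List Int) (k : Int) (hk : 1 ≤ k)
    (hfull : ¬ ((w.length : Int) < k)) :
    ∃ m, PySem.List.min? w (fun x => x) = some m := by
  cases hm : PySem.List.min? w (fun x => x) with
  | none =>
    have := (PySem.List.min?_eq_none_iff w (fun x : Int => x)).mp hm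
    subst this; simp at hfull; omega
  | some m => exact ⟨m, rfl⟩

-- the builder's accumulator is a pure prefix
theorem kpBuild_acc (p : List Int) (k : Int) :
    ∀ (fuel : Nat) (i : Int) (acc : List Int),
      kpBuild p k fuel i acc = acc ++ kpBuild p k fuel i [] := by
  intro fuel
  induction fuel with
  | zero => intro i acc; simp [kpBuild]
  | succ f ih =>
    intro i acc
    rw [kpBuild_succ, kpBuild_succ]
    split_ifs with h
    · simp
    · cases hm : PySem.List.min? (PySem.List.slice p (some (i - 1)) (some (i + k - 1)))
        (fun x => x) with
      | none => simp
      | some m =>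
        show kpBuild p k f (i + 1) (acc ++ [m]) = acc ++ kpBuild p k f (i + 1) ([] ++ [m])
        rw [ih (i + 1) (acc ++ [m]), ih (i + 1) ([] ++ [m])]
        simp

-- with adequate fuel the builder's value does not depend on the fuel
theorem kpBuild_stable (p : List Int) (k : Int) (hk : 1 ≤ k) :
    ∀ (fuel : Nat) (i : Int), 1 ≤ i → (p.length : Int) - k + 2 - i ≤ (fuel : Int) →
      kpBuild p k (fuel + 1) i [] = kpBuild p k fuel i [] := by
  intro fuel
  induction fuel with
  | zero =>
    intro i hi hf
    have hshort : ((PySem.List.slice p (some (i - 1)) (some (i + k - 1))).length : Int) < k := by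
      rw [window_len_int p k i hk hi]; omega
    rw [kpBuild_succ]
    simp [hshort, kpBuild]
  | succ f ih =>
    intro i hi hf
    rw [kpBuild_succ, kpBuild_succ]
    split_ifs with h
    · rfl
    · cases hm : PySem.List.min? (PySem.List.slice p (some (i - 1)) (some (i + k - 1)))
        (fun x => x) with
      | none => rfl
      | some m =>
        show kpBuild p k (f + 1) (i + 1) ([] ++ [m]) = kpBuild p k f (i + 1) ([] ++ [m])
        rw [kpBuild_acc p k (f + 1) (i + 1), kpBuild_acc p k f (i + 1),
          ih (i + 1) (by omega) (by omega)]

-- one unfolding step of kpMins: a short window ends the list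
theorem kpMins_short (p : List Int) (k i : Int)
    (hshort : ((PySem.List.slice p (some (i - 1)) (some (i + k - 1))).length : Int) < k) :
    kpMins p k i = [] := by
  unfold kpMins
  rw [show p.length + 2 = (p.length + 1) + 1 from rfl, kpBuild_succ]
  simp [hshort]

-- one unfolding step of kpMins: a full window contributes its minimum
theorem kpMins_cons (p : List Int) (k i m : Int) (hk : 1 ≤ k) (hi : 1 ≤ i)
    (hfull : ¬ ((PySem.List.slice p (some (i - 1)) (some (i + k - 1))).length : Int) < k)
    (hm : PySem.List.min? (PySem.List.slice p (some (i - 1)) (some (i + k - 1)))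
        (fun x => x) = some m) :
    kpMins p k i = m :: kpMins p k (i + 1) := by
  unfold kpMins
  rw [show p.length + 2 = (p.length + 1) + 1 from rfl, kpBuild_succ]
  rw [if_neg hfull, hm]
  show kpBuild p k (p.length + 1) (i + 1) ([] ++ [m])
      = m :: kpBuild p k ((p.length + 1) + 1) (i + 1) []
  rw [kpBuild_acc p k (p.length + 1) (i + 1),
    kpBuild_stable p k hk (p.length + 1) (i + 1) (by omega) (by push_cast; omega)]
  simp

-- simulation of A's while loop by B's stack consumption
theorem while_sim (p : List Int) (k j : Int) (hk : 1 ≤ k) :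
    ∀ (fuelA : Nat) (w : List Int) (i mw : Int),
      k ≤ i → PySem.List.min? w (fun x => x) = some mw →
      1 ≤ fuelA → (p.length : Int) - k + 3 - i ≤ (fuelA : Int) →
      (kpWhileA p k j fuelA (pyHeapify w) i = none ∧
        kpConsume j (mw :: kpMins p k i) i = none) ∨
      (∃ w' i' mw', kpWhileA p k j fuelA (pyHeapify w) i = some (pyHeapify w', i') ∧
        PySem.List.min? w' (fun x => x) = some mw' ∧ ¬ (mw' < j) ∧ k ≤ i' ∧
        kpConsume j (mw :: kpMins p k i) i = some (mw' :: kpMins p k i', i')) := by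
  intro fuelA
  induction fuelA with
  | zero => intro w i mw _ _ h1 _; omega
  | succ f ih =>
    intro w i mw hki hmw _ hfuel
    by_cases hlt : mw < j
    · -- the while advances
      by_cases hshort :
          ((PySem.List.slice p (some (i - 1)) (some (i + k - 1))).length : Int) < k
      · -- early return on both sides
        left
        constructor
        · rw [kpWhileA_succ, pyGet?_pyHeapify_zero, hmw]
          simp [hlt, hshort]
        · rw [kpMins_short p k i hshort]
          simp [kpConsume, hlt]
      · -- full window: step both sides and use the induction hypothesis
        obtain ⟨m', hm'⟩ := window_min_some _ k hk hshort
        have hstepA : kpWhileA p k j (f + 1) (pyHeapify w) i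
            = kpWhileA p k j f
                (pyHeapify (PySem.List.slice p (some (i - 1)) (some (i + k - 1)))) (i + 1) := by
          rw [kpWhileA_succ, pyGet?_pyHeapify_zero, hmw]
          simp [hlt, hshort]
        have hfull_bound : i ≤ (p.length : Int) - k + 1 := by
          rw [window_len_int p k i hk (by omega)] at hshort; omega
        have hrec := ih _ (i + 1) m' (by omega) hm' (by omega) (by omega)
        rw [kpMins_cons p k i m' hk (by omega) hshort hm']
        have hstepB : kpConsume j (mw :: m' :: kpMins p k (i + 1)) i
            = kpConsume j (m' :: kpMins p k (i + 1)) (i + 1) := by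
          simp [kpConsume, hlt]
        rcases hrec with ⟨hA, hB⟩ | ⟨w'', i'', mw'', hA, hm'', hge, hki'', hB⟩
        · left; rw [hstepA, hstepB]; exact ⟨hA, hB⟩
        · right
          exact ⟨w'', i'', mw'', by rw [hstepA]; exact hA, hm'', hge, hki'',
            by rw [hstepB]; exact hB⟩
    · -- the while exits immediately
      right
      refine ⟨w, i, mw, ?_, hmw, hlt, hki, ?_⟩
      · rw [kpWhileA_succ, pyGet?_pyHeapify_zero, hmw]; simp [hlt]
      · simp [kpConsume, hlt]

-- simulation of A's query loop by B's query loop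
theorem for_sim (p : List Int) (k : Int) (hk : 1 ≤ k) (hkp : ¬ ((p.length : Int) < k)) :
    ∀ (qs : List (Int × Int)) (ret w : List Int) (i mw : Int) (jl : Option Int),
      k ≤ i → PySem.List.min? w (fun x => x) = some mw →
      (∀ j0, jl = some j0 → ¬ (mw < j0)) →
      kpForA p k qs ret (pyHeapify w) i jl = kpForB k qs ret (mw :: kpMins p k i) i := by
  intro qs
  induction qs with
  | nil => intro ret w i mw jl _ _ _; rfl
  | cons hd rest ih =>
    intro ret w i mw jl hki hmw hjl
    obtain ⟨j, jret⟩ := hd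
    simp only [kpForA, kpForB, if_neg hkp]
    by_cases hj : some j = jl
    · -- dedup branch of A: the invariant says min ≥ j, so B's consume is a no-op
      have hge : ¬ (mw < j) := hjl j hj.symm
      rw [if_pos hj]
      have hcons : kpConsume j (mw :: kpMins p k i) i = some (mw :: kpMins p k i, i) := by
        simp [kpConsume, hge]
      rw [hcons]
      exact ih _ w i mw jl hki hmw hjl
    · rw [if_neg hj]
      rcases while_sim p k j hk (p.length + 2) w i mw hki hmw (by omega)
          (by push_cast; omega) with ⟨hA, hB⟩ | ⟨w', i', mw', hA, hm', hge, hki', hB⟩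
      · rw [hA, hB]
      · rw [hA, hB]
        exact ih _ w' i' mw' (some j) hki' hm'
          (fun j0 hj0 => by cases hj0; exact hge)

-- any write into the empty result list leaves it empty
theorem pySetD_nil (i : Int) (v : Int) : PySem.List.pySetD ([] : List Int) i v = [] := by
  have h := PySem.List.length_pySetD ([] : List Int) i v
  exact List.eq_nil_of_length_eq_zero h

-- with an empty result list A's loop can only return the empty list
theorem kpForA_nil_ret (p : List Int) (k : Int) :
    ∀ (qs : List (Int × Int)) (heap : List Int) (i : Int) (jl : Option Int),
      kpForA p k qs [] heap i jl = [] := by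
  intro qs
  induction qs with
  | nil => intro heap i jl; rfl
  | cons hd rest ih =>
    intro heap i jl
    obtain ⟨j, jret⟩ := hd
    simp only [kpForA]
    split_ifs with h1 h2
    · rfl
    · rw [pySetD_nil]; exact ih heap i jl
    · cases kpWhileA p k j (p.length + 2) heap i with
      | none => rfl
      | some s =>
        obtain ⟨heap', i'⟩ := s
        show kpForA p k rest (PySem.List.pySetD [] jret i') heap' i' (some j) = []
        rw [pySetD_nil]; exact ih heap' i' (some j)

-- when k > len(p) A's loop breaks at once (or the query list is empty)
theorem kpForA_break (p : List Int) (k : Int) (hkp : (p.length : Int) < k)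
    (qs : List (Int × Int)) (ret heap : List Int) (i : Int) (jl : Option Int) :
    kpForA p k qs ret heap i jl = ret := by
  cases qs with
  | nil => rfl
  | cons hd rest => obtain ⟨j, jret⟩ := hd; simp [kpForA, hkp]

-- ===== VERDICT (by name: the statement is the Claim_ definition above) =====
theorem kthPerson_spec : Claim_equal_kthPerson := by
  intro k p q _ hpre
  unfold Spec_kthPerson kthPerson kthPerson_alt
  by_cases hq : q = []
  · subst hq
    simp only [List.length_nil, List.replicate_zero]
    exact kpForA_nil_ret p k _ _ k none
  · have hk : 1 ≤ k := by
      rcases hpre with h | h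
      · exact h
      · exact absurd h hq
    simp only [if_neg hq]
    by_cases hkp : (p.length : Int) < k
    · rw [if_pos hkp, kpForA_break p k hkp]
    · rw [if_neg hkp]
      have hlen : ((PySem.List.slice p none (some k)).length : Int) = k := by
        rw [PySem.List.slice_to p (show (0:Int) ≤ k by omega)]
        simp only [List.length_take]
        omega
      obtain ⟨m0, hm0⟩ := window_min_some (PySem.List.slice p none (some k)) k hk
        (by omega)
      rw [hm0]
      show kpForA p k _ _ (pyHeapify (PySem.List.slice p none (some k))) k none
          = kpForB k _ _ (kpBuild p k (p.length + 2) k [m0]) k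
      rw [kpBuild_acc p k (p.length + 2) k [m0]]
      exact for_sim p k hk hkp _ _ _ k m0 none (le_refl k) hm0 (by intro j0 h; cases h)
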